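-- pv_equiv track=rewrite | github.com/daniel-reich/ubiquitous-fiesta | qKBfL9pQBaqXvKTfW_17.py | sum_of_slices
-- ===== SOURCE A (Python) =====
-- def sum_of_slices(lst):
--   i, res = 0, []
--   for j in range(len(lst)+1):
--     if sum(lst[i:j]) > 100:
--       res.append(sum(lst[i:j-1]))
--       i = j-1
--   if i == len(lst)-1: res.append(lst[i])
--   return res
-- ===== SOURCE B (Python) =====
-- def sum_of_slices(lst):
--   res, s, start = [], 0, 0
--   for k, x in enumerate(lst):
--     s += x
--     if s > 100:
--       res.append(s - x)
--       s = x
--       start = k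
--   if start == len(lst) - 1:
--     res.append(lst[start])
--   return res
-- ===== Notes on version B (the rewrite author's own statement) =====
-- stated objective: faster
-- what changed: Replaced the per-index re-summation of slices (sum(lst[i:j]) recomputed at every j) by a single pass keeping an incremental running sum and the current segment start.
import Mathlib
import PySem

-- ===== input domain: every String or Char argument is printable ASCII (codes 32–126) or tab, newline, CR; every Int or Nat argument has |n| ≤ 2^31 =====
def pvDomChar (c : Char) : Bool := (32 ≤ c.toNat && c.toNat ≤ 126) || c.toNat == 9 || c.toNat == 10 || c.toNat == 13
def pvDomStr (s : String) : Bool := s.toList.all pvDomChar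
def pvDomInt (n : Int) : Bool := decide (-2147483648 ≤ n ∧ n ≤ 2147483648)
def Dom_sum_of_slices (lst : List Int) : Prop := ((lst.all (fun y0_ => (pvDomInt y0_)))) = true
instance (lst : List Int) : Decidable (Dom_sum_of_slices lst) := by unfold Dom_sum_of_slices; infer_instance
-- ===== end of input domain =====

-- B replaces A's quadratic re-summation of slices by one pass with an incremental running sum (objective: faster).

-- ===== PORT A =====
-- loop body of A: state (i, res); 'if sum(lst[i:j]) > 100: res.append(sum(lst[i:j-1])); i = j-1'
def sumSlicesStepA (lst : List Int) (st : Int × List Int) (j : Int) : Int × List Int :=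
  if (PySem.List.slice lst (some st.1) (some j)).sum > 100 then
    (j - 1, st.2 ++ [(PySem.List.slice lst (some st.1) (some (j - 1))).sum])
  else st

def sum_of_slices (lst : List Int) : List Int :=
  let st := (PySem.List.pyRange 0 (PySem.List.len lst + 1) 1).foldl (sumSlicesStepA lst) (0, [])
  if st.1 = PySem.List.len lst - 1 then
    match PySem.List.pyGet? lst st.1 with   -- lst[i]; guard puts i in range, none unreachable
    | some v => st.2 ++ [v]
    | none => st.2
  else st.2

-- ===== PORT B =====
-- loop body of B: state (res, s, start); 's += x; if s > 100: res.append(s - x); s = x; start = k'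
def sumSlicesStepB (st : List Int × Int × Int) (kx : Int × Int) : List Int × Int × Int :=
  let s' := st.2.1 + kx.2
  if s' > 100 then (st.1 ++ [s' - kx.2], kx.2, kx.1)
  else (st.1, s', st.2.2)

def sum_of_slices_alt (lst : List Int) : List Int :=
  let st := (PySem.List.enumerate lst).foldl sumSlicesStepB ([], 0, 0)
  if st.2.2 = PySem.List.len lst - 1 then
    match PySem.List.pyGet? lst st.2.2 with   -- lst[start]; guard puts start in range, none unreachable
    | some v => st.1 ++ [v]
    | none => st.1
  else st.1

-- ===== PRECONDITION & SPEC =====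
def Spec_sum_of_slices (lst : List Int) (out : List Int) : Prop := out = sum_of_slices_alt lst
instance (lst : List Int) (out : List Int) : Decidable (Spec_sum_of_slices lst out) := by unfold Spec_sum_of_slices; infer_instance

-- ===== CLAIM (what is proved, stated in full; the proofs are below) =====
def Claim_equal_sum_of_slices : Prop := ∀ (lst : List Int), Dom_sum_of_slices lst → Spec_sum_of_slices lst (sum_of_slices lst)

-- ===== LEMMAS AND PROOFS =====

-- adding element lst[m] extends the sum of the current segment [k, m) to [k, m+1)
lemma seg_sum_succ (lst : List Int) (k m : Nat) (hk : k ≤ m) (hm : m < lst.length) :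
    ((lst.drop k).take (m + 1 - k)).sum = ((lst.drop k).take (m - k)).sum + lst[m] := by
  have hmk : m + 1 - k = (m - k) + 1 := by omega
  have hlen : m - k < (lst.drop k).length := by simp [List.length_drop]; omega
  rw [hmk, List.take_add_one, List.sum_append]
  have : (lst.drop k)[m - k]? = some lst[m] := by
    rw [List.getElem?_eq_getElem hlen]
    congr 1
    rw [List.getElem_drop]
    congr 1; omega
  simp [this]

-- the joint loop invariant: after processing j = 0..m on A's side and the first m
-- elements on B's side, the result lists agree, A's i equals B's start (a Nat k ≤ m),
-- and B's running sum is the sum of the open segment lst[k:m]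
lemma loop_inv (lst : List Int) (m : Nat) (hm : m ≤ lst.length) :
    ∃ k : Nat, k ≤ m ∧
      (((PySem.List.pyRange 0 ((m : Int) + 1) 1).foldl (sumSlicesStepA lst) (0, [])).1 = (k : Int)) ∧
      (((PySem.List.enumerate (lst.take m)).foldl sumSlicesStepB ([], 0, 0)).2.2 = (k : Int)) ∧
      (((PySem.List.pyRange 0 ((m : Int) + 1) 1).foldl (sumSlicesStepA lst) (0, [])).2 =
        ((PySem.List.enumerate (lst.take m)).foldl sumSlicesStepB ([], 0, 0)).1) ∧
      (((PySem.List.enumerate (lst.take m)).foldl sumSlicesStepB ([], 0, 0)).2.1 =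
        ((lst.drop k).take (m - k)).sum) := by
  induction m with
  | zero =>
    refine ⟨0, le_refl 0, ?_⟩
    have h01 : PySem.List.pyRange 0 1 1 = [0] := by decide
    simp only [Nat.cast_zero, zero_add, h01, List.foldl_cons, List.foldl_nil,
      List.take_zero, PySem.List.enumerate_nil]
    unfold sumSlicesStepA
    norm_num [PySem.List.slice_toNat]
  | succ m ih =>
    have hm' : m ≤ lst.length := by omega
    have hmlt : m < lst.length := by omega
    obtain ⟨k, hk, hA, hB, hres, hs⟩ := ih hm'
    -- split A's range at m+1
    have hrange : PySem.List.pyRange 0 ((m + 1 : Nat) : Int) 1 ++ [((m : Int) + 1)] =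
        PySem.List.pyRange 0 (((m + 1 : Nat) : Int) + 1) 1 := by
      push_cast
      exact (PySem.List.pyRange_one_succ_right (by positivity)).symm
    have hAfold : ((PySem.List.pyRange 0 (((m+1 : Nat) : Int) + 1) 1).foldl (sumSlicesStepA lst) (0, ([] : List Int))) =
        sumSlicesStepA lst ((PySem.List.pyRange 0 ((m : Int) + 1) 1).foldl (sumSlicesStepA lst) (0, [])) ((m : Int) + 1) := by
      rw [← hrange]; push_cast
      rw [List.foldl_append]; rfl
    -- split B's prefix at m
    have htake : lst.take (m + 1) = lst.take m ++ [lst[m]] := by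
      rw [List.take_add_one, List.getElem?_eq_getElem hmlt]; rfl
    have hBfold : ((PySem.List.enumerate (lst.take (m+1))).foldl sumSlicesStepB (([] : List Int), 0, 0)) =
        sumSlicesStepB ((PySem.List.enumerate (lst.take m)).foldl sumSlicesStepB ([], 0, 0)) ((m : Int), lst[m]) := by
      rw [htake, PySem.List.enumerate_append, List.foldl_append]
      simp [PySem.List.enumerate_cons, PySem.List.enumerate_nil, List.length_take, Nat.min_eq_left hm']
    set stA := (PySem.List.pyRange 0 ((m : Int) + 1) 1).foldl (sumSlicesStepA lst) (0, ([] : List Int)) with hstA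
    set stB := (PySem.List.enumerate (lst.take m)).foldl sumSlicesStepB (([] : List Int), 0, 0) with hstB
    -- the slice A sums at step j = m+1 is lst[k:m+1], whose sum is s + lst[m]
    have hslice : (PySem.List.slice lst (some stA.1) (some ((m : Int) + 1))).sum =
        stB.2.1 + lst[m] := by
      rw [hA, hs]
      have : ((m : Int) + 1) = (((m + 1 : Nat)) : Int) := by push_cast; ring
      rw [this, PySem.List.slice_natCast]
      exact seg_sum_succ lst k m hk hmlt
    have hslice' : (PySem.List.slice lst (some stA.1) (some (((m : Int) + 1) - 1))).sum =
        stB.2.1 := by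
      have h1 : ((m : Int) + 1 - 1) = (m : Int) := by ring
      rw [hA, h1, hs, PySem.List.slice_natCast]
    rw [hAfold, hBfold]
    unfold sumSlicesStepA sumSlicesStepB
    simp only [hslice, hslice']
    by_cases hgt : stB.2.1 + lst[m] > 100
    · refine ⟨m, by omega, ?_⟩
      simp [hgt, hres]
      have hd : List.take 1 (List.drop m lst) = [lst[m]] := by
        rw [List.drop_eq_getElem_cons hmlt]; rfl
      simp [hd]
    · refine ⟨k, by omega, ?_⟩
      rw [hs] at hgt
      simp [hgt, hA, hB, hres, hs]
      rw [seg_sum_succ lst k m hk hmlt]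

-- ===== VERDICT (by name: the statement is the Claim_ definition above) =====
theorem sum_of_slices_spec : Claim_equal_sum_of_slices := by
  intro lst _
  show sum_of_slices lst = sum_of_slices_alt lst
  obtain ⟨k, hk, hA, hB, hres, _⟩ := loop_inv lst lst.length (le_refl _)
  unfold sum_of_slices sum_of_slices_alt
  have hlen : PySem.List.len lst = (lst.length : Int) := PySem.List.len_eq lst
  rw [List.take_length] at hB hres
  simp only [hlen]
  rw [hA, hB, hres]
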